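-- pv_equiv track=rewrite | github.com/YyyyyyH/YyyyyyH | Test.py | Box_maker
-- ===== SOURCE A (Python) =====
-- def Box_maker(array):
--     grid_size= len(array)
--     size_box = int(grid_size**0.5)
--     boxes = []
--     for box_i in range(0, size_box):
--         for box_j in range(0, size_box):
--             box = []
--             for i in range(0, size_box):
--                 for j in range(0, size_box):
--                     box.append(array[size_box*box_i + i][size_box*box_j + j])
--             boxes.append(box)
--     return boxes
-- ===== SOURCE B (Python) =====
-- def Box_maker(array):
--     size_box = int(len(array) ** 0.5)
--     n = size_box * size_box
--     boxes = [[] for _ in range(n)]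
--     for i in range(n):
--         row = array[i]
--         bi = (i // size_box) * size_box
--         for j in range(n):
--             boxes[bi + j // size_box].append(row[j])
--     return boxes
-- ===== Notes on version B (the rewrite author's own statement) =====
-- stated objective: alternative
-- what changed: B makes a single row-major pass over the size_box^2 x size_box^2 grid, scattering each cell into a pre-allocated boxes[(i//size_box)*size_box + j//size_box], instead of A's four nested loops that gather each box cell-by-cell.
import Mathlib
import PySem

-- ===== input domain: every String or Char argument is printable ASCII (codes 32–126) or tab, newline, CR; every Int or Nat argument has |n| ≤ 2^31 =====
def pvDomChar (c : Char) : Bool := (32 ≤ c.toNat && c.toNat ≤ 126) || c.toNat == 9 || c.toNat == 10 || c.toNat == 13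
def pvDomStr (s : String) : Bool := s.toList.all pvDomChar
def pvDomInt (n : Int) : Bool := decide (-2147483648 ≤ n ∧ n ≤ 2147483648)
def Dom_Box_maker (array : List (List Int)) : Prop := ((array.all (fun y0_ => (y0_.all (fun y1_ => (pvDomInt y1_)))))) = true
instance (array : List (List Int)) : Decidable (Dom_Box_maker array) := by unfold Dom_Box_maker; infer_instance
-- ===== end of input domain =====

-- B is an alternative decomposition: one row-major pass scattering each cell into its
-- pre-allocated box, instead of A's box-by-box gathering; equivalence proved on Pre_.
-- All indices read are nonnegative and (under Pre_) in range, so `List.getD _ _ 0`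
-- is exact for the Python indexing there.

-- ===== PORT A =====
-- integer sqrt: int(n**0.5) (largest k with k*k <= n); kernel-reducible closed form
def pvIsqrt (n : Nat) : Nat := ((List.range n).filter (fun k => (k + 1) * (k + 1) ≤ n)).length

def Box_maker (array : List (List Int)) : List (List Int) :=
  let grid_size := array.length
  let size_box := pvIsqrt grid_size        -- int(grid_size**0.5), exact on realistic lengths
  (List.range size_box).foldl (fun boxes box_i =>
    (List.range size_box).foldl (fun boxes box_j =>
      boxes ++ [((List.range size_box).foldl (fun box i =>
        (List.range size_box).foldl (fun box j =>
          box ++ [(array.getD (size_box * box_i + i) []).getD (size_box * box_j + j) 0]) box) [])]) boxes) []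

-- ===== PORT B =====
def Box_maker_alt (array : List (List Int)) : List (List Int) :=
  let size_box := pvIsqrt array.length
  let n := size_box * size_box
  (List.range n).foldl (fun boxes i =>
    let row := array.getD i []
    let bi := (i / size_box) * size_box
    (List.range n).foldl (fun boxes j =>
      boxes.modify (bi + j / size_box) (· ++ [row.getD j 0])) boxes)
    (List.replicate n [])

-- ===== PRECONDITION & SPEC =====
-- Pre_ excludes exactly the ragged grids on which Python A raises IndexError:
-- some row among the first size_box^2 is shorter than size_box^2 (B raises there too).
def Pre_Box_maker (array : List (List Int)) : Prop :=
  ∀ row ∈ array.take (pvIsqrt array.length * pvIsqrt array.length),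
    pvIsqrt array.length * pvIsqrt array.length ≤ row.length
instance (array : List (List Int)) : Decidable (Pre_Box_maker array) := by
  unfold Pre_Box_maker; infer_instance

def pvWitness_Box_maker : List (List Int) :=
  [[1, 2, 3, 4], [5, 6, 7, 8], [9, 10, 11, 12], [13, 14, 15, 16]]

def Spec_Box_maker (array : List (List Int)) (out : List (List Int)) : Prop := out = Box_maker_alt array
instance (array : List (List Int)) (out : List (List Int)) : Decidable (Spec_Box_maker array out) := by unfold Spec_Box_maker; infer_instance

-- ===== CLAIM (what is proved, stated in full; the proofs are below) =====
def Claim_equal_Box_maker : Prop := ∀ (array : List (List Int)), Dom_Box_maker array → Pre_Box_maker array → Spec_Box_maker array (Box_maker array)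

-- ===== LEMMAS AND PROOFS =====

-- the cell read at (global) position (i, j)
def pvCell (array : List (List Int)) (i j : Nat) : Int := (array.getD i []).getD j 0

theorem foldl_congr' {α β : Type} {l : List α} {f g : β → α → β} {init : β}
    (h : ∀ b : β, ∀ a ∈ l, f b a = g b a) : l.foldl f init = l.foldl g init := by
  induction l generalizing init with
  | nil => rfl
  | cons x t ih =>
      rw [List.foldl_cons, List.foldl_cons, h init x (List.mem_cons_self ..)]
      exact ih (fun b a ha => h b a (List.mem_cons_of_mem _ ha))

-- quotient/remainder decomposition of `List.range (c * s)` into s-blocks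
theorem range_mul_flatMap (c s : Nat) :
    List.range (c * s) = (List.range c).flatMap (fun q => (List.range s).map (fun r => q * s + r)) := by
  induction c with
  | zero => simp
  | succ c ih =>
      rw [Nat.succ_mul, List.range_add, ih, List.range_succ, List.flatMap_append]
      simp

theorem div_of_block {s q r : Nat} (hr : r < s) : (q * s + r) / s = q := by
  have hs : 0 < s := by omega
  rw [Nat.mul_comm q s, Nat.mul_add_div hs, Nat.div_eq_of_lt hr, Nat.add_zero]

theorem block_eq_iff {s a x b y : Nat} (hx : x < s) (hy : y < s) :
    a * s + x = b * s + y ↔ a = b ∧ x = y := by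
  constructor
  · intro h
    have ha : a = b := by
      have h1 := div_of_block (q := a) hx
      have h2 := div_of_block (q := b) hy
      rw [← h1, h, h2]
    subst ha
    exact ⟨rfl, Nat.add_left_cancel h⟩
  · rintro ⟨rfl, rfl⟩; rfl

-- flatMap over a Nodup list keeping only the block at b
theorem flatMap_if_eq {α : Type} (l : List Nat) (b : Nat) (f : Nat → List α)
    (hn : l.Nodup) (hb : b ∈ l) :
    (l.flatMap (fun q => if q = b then f q else [])) = f b := by
  induction l with
  | nil => cases hb
  | cons x t ih =>
      rcases List.nodup_cons.mp hn with ⟨hx, ht⟩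
      by_cases hxb : x = b
      · subst hxb
        have hz : t.flatMap (fun q => if q = x then f q else []) = [] := by
          apply List.flatMap_eq_nil_iff.mpr
          intro q hq
          by_cases e : q = x
          · rw [e] at hq; exact absurd hq hx
          · rw [if_neg e]
        rw [List.flatMap_cons, if_pos rfl, hz, List.append_nil]
      · have hb' : b ∈ t := by
          rcases List.mem_cons.mp hb with h | h
          · exact absurd h.symm hxb
          · exact h
        rw [List.flatMap_cons, if_neg hxb, List.nil_append, ih ht hb']

-- filtering range (s*s) by its s-quotient picks out one block
theorem filter_range_div (s b : Nat) (hb : b < s) :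
    (List.range (s * s)).filter (fun x => decide (x / s = b))
      = (List.range s).map (fun r => b * s + r) := by
  rw [range_mul_flatMap s s, List.filter_flatMap]
  have hblock : ∀ q ∈ List.range s,
      ((List.range s).map (fun r => q * s + r)).filter (fun x => decide (x / s = b))
        = if q = b then (List.range s).map (fun r => q * s + r) else [] := by
    intro q _
    rw [List.filter_map]
    have hc : ∀ r ∈ List.range s,
        ((fun x => decide (x / s = b)) ∘ fun r => q * s + r) r = decide (q = b) := by
      intro r hr
      simp only [Function.comp_apply]
      rw [div_of_block (List.mem_range.mp hr)]
    rw [List.filter_congr hc]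
    by_cases h : q = b <;> simp [h]
  calc (List.range s).flatMap
        (fun q => ((List.range s).map (fun r => q * s + r)).filter (fun x => decide (x / s = b)))
      = (List.range s).flatMap
        (fun q => if q = b then (List.range s).map (fun r => q * s + r) else []) :=
        List.flatMap_congr hblock
    _ = (List.range s).map (fun r => b * s + r) :=
        flatMap_if_eq _ _ _ List.nodup_range (List.mem_range.mpr hb)

-- the scatter loop, pointwise: foldl of modify-append = initial ++ selected cells
theorem scatter_getElem? {α : Type} (key : α → Nat) (val : α → Int)
    (P : List α) (init : List (List Int)) (h : ∀ p ∈ P, key p < init.length) (k : Nat) :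
    (P.foldl (fun bs p => bs.modify (key p) (· ++ [val p])) init)[k]?
      = init[k]?.map (· ++ (P.filter (fun p => key p == k)).map val) := by
  induction P generalizing init with
  | nil => simp
  | cons p t ih =>
      have hlen : (init.modify (key p) (· ++ [val p])).length = init.length :=
        List.length_modify ..
      have ht : ∀ q ∈ t, key q < (init.modify (key p) (· ++ [val p])).length := by
        intro q hq; rw [hlen]; exact h q (List.mem_cons_of_mem _ hq)
      rw [List.foldl_cons, ih _ ht, List.getElem?_modify]
      by_cases hk : key p = k
      · subst hk
        cases hinit : init[key p]? with
        | none =>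
            have := List.getElem?_eq_none_iff.mp hinit
            exact absurd (h p (List.mem_cons_self ..)) (by omega)
        | some b => simp
      · have hne : (key p == k) = false := by simp [hk]
        cases hinit : init[k]? with
        | none => simp [hk]
        | some b => simp [hk, hne]

-- A's port as a flatMap/map closed form
theorem portA_closed (array : List (List Int)) :
    Box_maker array
      = (List.range (pvIsqrt array.length)).flatMap (fun bi =>
          (List.range (pvIsqrt array.length)).map (fun bj =>
            (List.range (pvIsqrt array.length)).flatMap (fun i =>
              (List.range (pvIsqrt array.length)).map (fun j =>
                pvCell array (pvIsqrt array.length * bi + i) (pvIsqrt array.length * bj + j))))) := by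
  unfold Box_maker pvCell
  set s := pvIsqrt array.length with hs
  have hbox : ∀ bi bj : Nat,
      (List.range s).foldl (fun box i =>
        (List.range s).foldl (fun box j =>
          box ++ [(array.getD (s * bi + i) []).getD (s * bj + j) 0]) box) []
      = (List.range s).flatMap (fun i => (List.range s).map (fun j =>
          (array.getD (s * bi + i) []).getD (s * bj + j) 0)) := by
    intro bi bj
    calc (List.range s).foldl (fun box i =>
          (List.range s).foldl (fun box j =>
            box ++ [(array.getD (s * bi + i) []).getD (s * bj + j) 0]) box) []
        = (List.range s).foldl (fun box i =>
            box ++ (List.range s).map (fun j => (array.getD (s * bi + i) []).getD (s * bj + j) 0)) [] :=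
          foldl_congr' (fun box i _ => PySem.List.foldl_append_singleton_eq_map ..)
      _ = _ := by
          simpa using PySem.List.foldl_append_eq_flatMap
            (l := List.range s)
            (g := fun i => (List.range s).map (fun j => (array.getD (s * bi + i) []).getD (s * bj + j) 0))
            (acc := [])
  calc (List.range s).foldl (fun boxes box_i =>
        (List.range s).foldl (fun boxes box_j =>
          boxes ++ [((List.range s).foldl (fun box i =>
            (List.range s).foldl (fun box j =>
              box ++ [(array.getD (s * box_i + i) []).getD (s * box_j + j) 0]) box) [])]) boxes) []
      = (List.range s).foldl (fun boxes box_i =>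
          boxes ++ (List.range s).map (fun box_j =>
            (List.range s).flatMap (fun i => (List.range s).map (fun j =>
              (array.getD (s * box_i + i) []).getD (s * box_j + j) 0)))) [] := by
        refine foldl_congr' (fun boxes box_i _ => ?_)
        calc (List.range s).foldl (fun boxes box_j =>
              boxes ++ [((List.range s).foldl (fun box i =>
                (List.range s).foldl (fun box j =>
                  box ++ [(array.getD (s * box_i + i) []).getD (s * box_j + j) 0]) box) [])]) boxes
            = (List.range s).foldl (fun boxes box_j =>
                boxes ++ [(List.range s).flatMap (fun i => (List.range s).map (fun j =>
                  (array.getD (s * box_i + i) []).getD (s * box_j + j) 0))]) boxes :=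
              foldl_congr' (fun boxes box_j _ => by rw [hbox box_i box_j])
          _ = _ := PySem.List.foldl_append_singleton_eq_map ..
    _ = _ := by
        simpa using PySem.List.foldl_append_eq_flatMap
          (l := List.range s)
          (g := fun box_i => (List.range s).map (fun box_j =>
            (List.range s).flatMap (fun i => (List.range s).map (fun j =>
              (array.getD (s * box_i + i) []).getD (s * box_j + j) 0))))
          (acc := [])

-- the cells B scatters into box k, in the order B visits them
def pvSel (array : List (List Int)) (s k : Nat) : List Int :=
  (((List.range (s * s)).flatMap (fun i => (List.range (s * s)).map (fun j => (i, j)))).filter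
      (fun p => (p.1 / s) * s + p.2 / s == k)).map (fun p => pvCell array p.1 p.2)

-- B's port as a map over box indices
theorem portB_closed (array : List (List Int)) :
    Box_maker_alt array
      = (List.range (pvIsqrt array.length * pvIsqrt array.length)).map
          (fun k => pvSel array (pvIsqrt array.length) k) := by
  unfold Box_maker_alt
  set s := pvIsqrt array.length with hs
  set n := s * s with hn
  set P : List (Nat × Nat) :=
    (List.range n).flatMap (fun i => (List.range n).map (fun j => (i, j))) with hP
  have key_lt : ∀ p ∈ P, (p.1 / s) * s + p.2 / s < n := by
    intro p hp
    rw [hP] at hp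
    rcases List.mem_flatMap.mp hp with ⟨i, hi, hp2⟩
    rcases List.mem_map.mp hp2 with ⟨j, hj, rfl⟩
    have hi' := List.mem_range.mp hi
    have hj' := List.mem_range.mp hj
    have hipos : 0 < n := by omega
    have hs0 : 0 < s :=
      Nat.pos_of_ne_zero (fun h0 => by rw [hn, h0, Nat.mul_zero] at hipos; omega)
    have h1 : i / s < s := Nat.div_lt_of_lt_mul (by rw [← hn]; exact hi')
    have h2 : j / s < s := Nat.div_lt_of_lt_mul (by rw [← hn]; exact hj')
    have : (i / s) * s + j / s < (i / s) * s + s := by omega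
    calc (i / s) * s + j / s < (i / s) * s + s := this
      _ = (i / s + 1) * s := by ring
      _ ≤ s * s := Nat.mul_le_mul_right s (by omega)
      _ = n := hn.symm
  have hfold :
      (List.range n).foldl (fun boxes i =>
        (List.range n).foldl (fun boxes j =>
          boxes.modify ((i / s) * s + j / s) (· ++ [(array.getD i []).getD j 0])) boxes)
        (List.replicate n [])
      = P.foldl (fun bs p =>
          bs.modify ((p.1 / s) * s + p.2 / s) (· ++ [pvCell array p.1 p.2]))
        (List.replicate n []) := by
    rw [hP, List.foldl_flatMap]
    exact foldl_congr' (fun bs i _ => by rw [List.foldl_map]; rfl)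
  rw [hfold]
  apply List.ext_getElem?
  intro k
  rw [scatter_getElem? (fun p => (p.1 / s) * s + p.2 / s) (fun p => pvCell array p.1 p.2) P
        (List.replicate n []) (by simpa using key_lt) k]
  by_cases hk : k < n
  · rw [List.getElem?_replicate]
    simp only [hk, if_pos]
    rw [List.getElem?_map, List.getElem?_range hk]
    simp [pvSel, hP, hn]
  · rw [List.getElem?_eq_none (by simpa using Nat.le_of_not_lt hk),
        List.getElem?_eq_none (by simpa using Nat.le_of_not_lt hk)]
    rfl

-- the index pairs B sends to box bi*s+bj, in visit order
theorem filter_P (s bi bj : Nat) (hbi : bi < s) (hbj : bj < s) :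
    (((List.range (s * s)).flatMap (fun i => (List.range (s * s)).map (fun j => (i, j)))).filter
        (fun p => (p.1 / s) * s + p.2 / s == bi * s + bj))
      = (List.range s).flatMap (fun r => (List.range s).map (fun j => (bi * s + r, bj * s + j))) := by
  rw [List.filter_flatMap]
  have hinner : ∀ i ∈ List.range (s * s),
      ((List.range (s * s)).map (fun j => (i, j))).filter
          (fun p => (p.1 / s) * s + p.2 / s == bi * s + bj)
        = if i / s = bi then (List.range s).map (fun j => (i, bj * s + j)) else [] := by
    intro i _
    rw [List.filter_map]
    have hc : ∀ j ∈ List.range (s * s),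
        ((fun p : Nat × Nat => (p.1 / s) * s + p.2 / s == bi * s + bj) ∘ fun j => (i, j)) j
          = (decide (i / s = bi) && decide (j / s = bj)) := by
      intro j hj
      have hjs : j / s < s := Nat.div_lt_of_lt_mul (List.mem_range.mp hj)
      simp only [Function.comp_apply]
      rw [Bool.eq_iff_iff]
      simp only [beq_iff_eq, Bool.and_eq_true, decide_eq_true_eq]
      exact block_eq_iff hjs hbj
    rw [List.filter_congr hc]
    by_cases h1 : i / s = bi
    · simp only [h1, decide_true, Bool.true_and, if_pos]
      rw [filter_range_div s bj hbj, List.map_map]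
      rfl
    · simp [h1]
  calc (List.range (s * s)).flatMap (fun i =>
        ((List.range (s * s)).map (fun j => (i, j))).filter
          (fun p => (p.1 / s) * s + p.2 / s == bi * s + bj))
      = (List.range (s * s)).flatMap (fun i =>
          if i / s = bi then (List.range s).map (fun j => (i, bj * s + j)) else []) :=
        List.flatMap_congr hinner
    _ = (List.range s).flatMap (fun q => (List.range s).flatMap (fun r =>
          if (q * s + r) / s = bi
          then (List.range s).map (fun j => (q * s + r, bj * s + j)) else [])) := by
        rw [range_mul_flatMap s s]
        rw [List.flatMap_assoc]
        exact List.flatMap_congr (fun q _ => by rw [List.flatMap_map])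
    _ = (List.range s).flatMap (fun q =>
          if q = bi
          then (List.range s).flatMap (fun r => (List.range s).map (fun j => (q * s + r, bj * s + j)))
          else []) := by
        refine List.flatMap_congr (fun q _ => ?_)
        have hrw : ∀ r ∈ List.range s,
            (if (q * s + r) / s = bi
              then (List.range s).map (fun j => (q * s + r, bj * s + j)) else [])
            = (if q = bi
              then (List.range s).map (fun j => (q * s + r, bj * s + j)) else []) := by
          intro r hr
          rw [div_of_block (List.mem_range.mp hr)]
        rw [List.flatMap_congr hrw]
        by_cases h : q = bi
        · simp [h]
        · simp [h]
    _ = _ :=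
        flatMap_if_eq _ _ _ List.nodup_range (List.mem_range.mpr hbi)

-- the selection for box (bi, bj) is exactly A's box (bi, bj)
theorem sel_eq_box (array : List (List Int)) (s bi bj : Nat) (hbi : bi < s) (hbj : bj < s) :
    pvSel array s (bi * s + bj)
      = (List.range s).flatMap (fun i => (List.range s).map (fun j =>
          pvCell array (s * bi + i) (s * bj + j))) := by
  unfold pvSel
  rw [filter_P s bi bj hbi hbj, List.map_flatMap]
  refine List.flatMap_congr (fun r _ => ?_)
  rw [List.map_map]
  refine List.map_congr_left (fun j _ => ?_)
  simp only [Function.comp_apply]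
  rw [Nat.mul_comm bi s, Nat.mul_comm bj s]

-- ===== VERDICT (by name: the statement is the Claim_ definition above) =====
theorem Box_maker_spec : Claim_equal_Box_maker := by
  intro array _hdom _hpre
  unfold Spec_Box_maker
  rw [portA_closed, portB_closed]
  set s := pvIsqrt array.length with hs
  rw [range_mul_flatMap s s, List.map_flatMap]
  refine List.flatMap_congr (fun bi hbi => ?_)
  rw [List.map_map]
  refine List.map_congr_left (fun bj hbj => ?_)
  simp only [Function.comp_apply]
  exact (sel_eq_box array s bi bj (List.mem_range.mp hbi) (List.mem_range.mp hbj)).symm
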